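-- pv_equiv track=rewrite | github.com/jwbrunt/backup-monitor-local | backup_monitor/core/monitor.py | _group_failover_locations
-- ===== SOURCE A (Python) =====
-- from typing import Dict, List, Any, Optional
--
-- def _group_failover_locations(locations: List[Dict[str, Any]]) -> Dict[str, List[Dict[str, Any]]]:
--     """Group locations by failover_group configuration.
--
--     Args:
--         locations: List of location configurations.
--
--     Returns:
--         Dictionary mapping failover group names to location lists.
--     """
--     failover_groups = {}
--
--     for location in locations:
--         failover_group = location.get('failover_group')
--         if failover_group:
--             if failover_group not in failover_groups:
--                 failover_groups[failover_group] = []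
--             failover_groups[failover_group].append(location)
--
--     # Only return groups with multiple locations
--     return {group: locs for group, locs in failover_groups.items() if len(locs) > 1}
-- ===== SOURCE B (Python) =====
-- def _group_failover_locations(locations):
--     """Group locations by failover_group; keep only groups that occur more than once.
--
--     Two passes: first count occurrences of each truthy failover_group, then
--     insert qualifying locations into the result in first-appearance order.
--     """
--     counts = {}
--     for location in locations:
--         group = location.get('failover_group')
--         if group:
--             counts[group] = counts.get(group, 0) + 1
--     result = {}
--     for location in locations:
--         group = location.get('failover_group')
--         if group and counts[group] > 1:
--             result.setdefault(group, []).append(location)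
--     return result
-- ===== Notes on version B (the rewrite author's own statement) =====
-- stated objective: alternative
-- what changed: B decides group membership up front with a count table built in a first pass and fills the result directly in a second pass over the locations, instead of A's group-everything-then-filter dict comprehension.
import Mathlib
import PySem

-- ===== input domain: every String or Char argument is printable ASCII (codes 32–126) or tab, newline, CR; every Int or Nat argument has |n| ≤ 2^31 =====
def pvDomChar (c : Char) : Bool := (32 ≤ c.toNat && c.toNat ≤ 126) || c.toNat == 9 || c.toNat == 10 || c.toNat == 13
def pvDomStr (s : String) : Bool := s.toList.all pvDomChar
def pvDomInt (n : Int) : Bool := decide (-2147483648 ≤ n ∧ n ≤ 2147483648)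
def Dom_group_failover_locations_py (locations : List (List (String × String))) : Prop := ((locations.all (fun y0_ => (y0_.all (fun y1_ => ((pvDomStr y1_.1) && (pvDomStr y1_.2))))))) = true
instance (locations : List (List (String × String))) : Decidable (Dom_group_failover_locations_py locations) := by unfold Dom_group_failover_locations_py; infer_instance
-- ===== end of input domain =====

-- B replaces A's group-everything-then-filter dict comprehension by a count-table first pass
-- and a second pass that inserts only qualifying locations (alternative decomposition, same cost).


-- ===== PORT A =====
def group_failover_locations_py (locations : List (List (String × String))) : List (String × List (List (String × String))) :=
  let failover_groups : PySem.Dict String (List (List (String × String))) :=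
    locations.foldl (fun d location =>
      match (PySem.Dict.mk location).get? "failover_group" with
      | some failover_group =>
        if failover_group ≠ "" then
          let d' := if d.contains failover_group then d else d.insert failover_group []
          d'.modify failover_group [] (fun ls => ls ++ [location])
        else d
      | none => d) PySem.Dict.empty
  failover_groups.items.filter (fun p => 1 < p.2.length)

-- ===== PORT B =====
def group_failover_locations_py_alt (locations : List (List (String × String))) : List (String × List (List (String × String))) :=
  let counts : PySem.Dict String Int :=
    locations.foldl (fun c location =>
      match (PySem.Dict.mk location).get? "failover_group" with
      | some group => if group ≠ "" then c.insert group (c.getD group 0 + 1) else c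
      | none => c) PySem.Dict.empty
  let result : PySem.Dict String (List (List (String × String))) :=
    locations.foldl (fun r location =>
      match (PySem.Dict.mk location).get? "failover_group" with
      | some group =>
        if group ≠ "" ∧ 1 < counts.getD group 0 then
          (r.setdefault group []).modify group [] (fun ls => ls ++ [location])
        else r
      | none => r) PySem.Dict.empty
  result.items

-- ===== PRECONDITION & SPEC =====
def Spec_group_failover_locations_py (locations : List (List (String × String))) (out : List (String × List (List (String × String)))) : Prop := out = group_failover_locations_py_alt locations
instance (locations : List (List (String × String))) (out : List (String × List (List (String × String)))) : Decidable (Spec_group_failover_locations_py locations out) := by unfold Spec_group_failover_locations_py; infer_instance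

-- ===== CLAIM (what is proved, stated in full; the proofs are below) =====
def Claim_equal_group_failover_locations_py : Prop := ∀ (locations : List (List (String × String))), Dom_group_failover_locations_py locations → Spec_group_failover_locations_py locations (group_failover_locations_py locations)

-- ===== LEMMAS AND PROOFS =====

-- The truthy failover_group of a location, if any.
def pvKey? (loc : List (String × String)) : Option String :=
  match (PySem.Dict.mk loc).get? "failover_group" with
  | some s => if s = "" then none else some s
  | none => none

-- (group, location) pairs for the locations with a truthy failover_group.
def pvPairs (locations : List (List (String × String))) : List (String × List (String × String)) :=
  locations.filterMap (fun loc => (pvKey? loc).map (fun s => (s, loc)))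

-- The grouping fold both ports reduce to.
def pvG (l : List (String × List (String × String))) : PySem.Dict String (List (List (String × String))) :=
  l.foldl (fun d p => d.modify p.1 [] (fun x => x ++ [p.2])) PySem.Dict.empty

theorem pvModify_contains_step {κ ν : Type} [BEq κ] [LawfulBEq κ]
    (d : PySem.Dict κ ν) (k : κ) (v : ν) (f : ν → ν) :
    (if d.contains k then d else d.insert k v).modify k v f = d.modify k v f := by
  by_cases h : d.contains k
  · simp [h]
  · simp only [Bool.not_eq_true] at h
    simp only [h, Bool.false_eq_true, if_false, PySem.Dict.modify]
    rw [PySem.Dict.getD_insert_self, PySem.Dict.insert_insert_self,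
      PySem.Dict.getD_of_not_contains d v h]

theorem pvSetdefault_modify_step {κ ν : Type} [BEq κ] [LawfulBEq κ]
    (d : PySem.Dict κ ν) (k : κ) (v : ν) (f : ν → ν) :
    (d.setdefault k v).modify k v f = d.modify k v f := by
  by_cases h : d.contains k
  · rw [PySem.Dict.setdefault_of_contains d v h]
  · simp only [Bool.not_eq_true] at h
    rw [PySem.Dict.setdefault_of_not_contains d v h]
    simp only [PySem.Dict.modify]
    rw [PySem.Dict.getD_insert_self, PySem.Dict.insert_insert_self,
      PySem.Dict.getD_of_not_contains d v h]

theorem pvFoldA (locations : List (List (String × String))) :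
    locations.foldl (fun d location =>
      match (PySem.Dict.mk location).get? "failover_group" with
      | some failover_group =>
        if failover_group ≠ "" then
          (if d.contains failover_group then d else d.insert failover_group []).modify
            failover_group [] (fun ls => ls ++ [location])
        else d
      | none => d) PySem.Dict.empty
    = pvG (pvPairs locations) := by
  rw [pvG, pvPairs, List.foldl_filterMap]
  apply PySem.List.foldl_congr_mem
  intro d loc _
  rcases h : (PySem.Dict.mk loc).get? "failover_group" with _ | s
  · simp [pvKey?, h]
  · simp only [pvKey?, h]
    by_cases hs : s = ""
    · simp [hs]
    · simp only [hs, if_false, ne_eq, not_false_iff, if_true, Option.map_some]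
      exact pvModify_contains_step d s [] _

theorem pvFoldCounts (locations : List (List (String × String))) :
    locations.foldl (fun c location =>
      match (PySem.Dict.mk location).get? "failover_group" with
      | some group => if group ≠ "" then c.insert group (c.getD group 0 + 1) else c
      | none => c) (PySem.Dict.empty : PySem.Dict String Int)
    = ((pvPairs locations).map Prod.fst).foldl
        (fun d x => d.insert x (d.getD x 0 + 1)) PySem.Dict.empty := by
  rw [List.foldl_map, pvPairs, List.foldl_filterMap]
  apply PySem.List.foldl_congr_mem
  intro d loc _
  rcases h : (PySem.Dict.mk loc).get? "failover_group" with _ | s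
  · simp [pvKey?, h]
  · simp only [pvKey?, h]
    by_cases hs : s = "" <;> simp [hs]

theorem pvFoldB (q : String → Bool) (locations : List (List (String × String))) :
    locations.foldl (fun r loc =>
      match pvKey? loc with
      | some g => if q g then (r.setdefault g []).modify g [] (fun ls => ls ++ [loc]) else r
      | none => r) PySem.Dict.empty
    = pvG ((pvPairs locations).filter (fun p => q p.1)) := by
  rw [pvG, List.foldl_filter]
  conv_rhs => rw [pvPairs, List.foldl_filterMap]
  apply PySem.List.foldl_congr_mem
  intro r loc _
  rcases h : pvKey? loc with _ | g
  · simp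
  · by_cases hq : q g = true
    · simp only [hq, if_true, Option.map_some]
      exact pvSetdefault_modify_step r g [] _
    · simp only [Bool.not_eq_true] at hq
      simp [hq]

-- ofList commutes with filter
theorem pvOfList_filter {α : Type} [BEq α] [LawfulBEq α] (p : α → Bool) (l : List α) :
    PySem.Set.ofList (l.filter p) = (PySem.Set.ofList l).filter p := by
  induction l using List.reverseRecOn with
  | nil => rfl
  | append_singleton xs x ih =>
    rw [List.filter_append, PySem.Set.ofList_append_singleton, PySem.Set.add_eq_ite]
    by_cases hp : p x = true
    · simp only [List.filter_cons, hp, if_true, List.filter_nil,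
        PySem.Set.ofList_append_singleton, ih, PySem.Set.add_eq_ite, List.mem_filter]
      by_cases hx : x ∈ PySem.Set.ofList xs
      · simp [hx]
      · simp [hx, hp, List.filter_append]
    · simp only [Bool.not_eq_true] at hp
      simp only [List.filter_cons, hp, Bool.false_eq_true, if_false, List.filter_nil,
        List.append_nil, ih]
      split_ifs with hmem
      · rfl
      · rw [List.filter_append]
        simp [hp]

theorem pvItems_pvG (l : List (String × List (String × String))) :
    (pvG l).items
      = (PySem.Set.ofList (l.map Prod.fst)).map
          (fun k => (k, (l.filter (fun p => p.1 == k)).map (fun p => p.2))) := by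
  have hnd : (pvG l).keys.Nodup := by
    apply PySem.Dict.nodup_keys_foldl_modify_key l Prod.fst [] (fun _ p => (fun x => x ++ [p.2]))
    simp [PySem.Dict.keys_empty]
  rw [PySem.Dict.items_eq_map_keys _ hnd []]
  have hkeys : (pvG l).keys = PySem.Set.ofList (l.map Prod.fst) := by
    rw [pvG, PySem.Dict.keys_foldl_modify_key l Prod.fst [] (fun _ p => (fun x => x ++ [p.2])),
      PySem.Dict.keys_empty, PySem.Set.update_nil_left]
  rw [hkeys]
  apply List.map_congr_left
  intro k _
  rw [pvG, PySem.Dict.getD_foldl_modify_append l PySem.Dict.empty k,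
    PySem.Dict.getD_empty, List.nil_append]

theorem pvCount_filter (l : List (String × List (String × String))) (k : String) :
    (l.map Prod.fst).count k = (l.filter (fun p => p.1 == k)).length := by
  rw [List.count_eq_countP, List.countP_map, List.countP_eq_length_filter]
  rfl

-- ===== VERDICT (by name: the statement is the Claim_ definition above) =====
theorem group_failover_locations_py_spec : Claim_equal_group_failover_locations_py := by
  intro locations _
  unfold Spec_group_failover_locations_py
  simp only [group_failover_locations_py, group_failover_locations_py_alt]
  rw [pvFoldA]
  have hcnt : ∀ g : String, (locations.foldl (fun c location =>
        match (PySem.Dict.mk location).get? "failover_group" with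
        | some group => if group ≠ "" then c.insert group (c.getD group 0 + 1) else c
        | none => c) (PySem.Dict.empty : PySem.Dict String Int)).getD g 0
      = ((((pvPairs locations).map Prod.fst).count g : Int)) := by
    intro g
    rw [pvFoldCounts locations,
      PySem.Dict.getD_foldl_insert_add_one ((pvPairs locations).map Prod.fst) PySem.Dict.empty g,
      PySem.Dict.getD_empty, zero_add]
  -- rewrite B's second fold into pvG of the filtered pair list
  have hsecond :
      locations.foldl (fun r location =>
        match (PySem.Dict.mk location).get? "failover_group" with
        | some group =>
          if group ≠ "" ∧ 1 < (locations.foldl (fun c location =>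
              match (PySem.Dict.mk location).get? "failover_group" with
              | some group => if group ≠ "" then c.insert group (c.getD group 0 + 1) else c
              | none => c) (PySem.Dict.empty : PySem.Dict String Int)).getD group 0 then
            (r.setdefault group []).modify group [] (fun ls => ls ++ [location])
          else r
        | none => r) PySem.Dict.empty
      = pvG ((pvPairs locations).filter
          (fun p => decide (1 < ((((pvPairs locations).map Prod.fst).count p.1 : Int))))) := by
    have h1 : locations.foldl (fun r location =>
        match (PySem.Dict.mk location).get? "failover_group" with
        | some group =>
          if group ≠ "" ∧ 1 < (locations.foldl (fun c location =>
              match (PySem.Dict.mk location).get? "failover_group" with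
              | some group => if group ≠ "" then c.insert group (c.getD group 0 + 1) else c
              | none => c) (PySem.Dict.empty : PySem.Dict String Int)).getD group 0 then
            (r.setdefault group []).modify group [] (fun ls => ls ++ [location])
          else r
        | none => r) PySem.Dict.empty
        = locations.foldl (fun r loc =>
          match pvKey? loc with
          | some g => if (fun g => decide (1 < ((((pvPairs locations).map Prod.fst).count g : Int)))) g then
              (r.setdefault g []).modify g [] (fun ls => ls ++ [loc]) else r
          | none => r) PySem.Dict.empty := by
      apply PySem.List.foldl_congr_mem
      intro r loc _
      rcases h : (PySem.Dict.mk loc).get? "failover_group" with _ | s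
      · simp [pvKey?, h]
      · simp only [pvKey?, h]
        by_cases hs : s = ""
        · simp [hs]
        · by_cases hx : 1 < ((((pvPairs locations).map Prod.fst).count s : Int))
          · rw [if_pos ⟨hs, by rw [hcnt s]; exact hx⟩]
            simp [hs, hx]
          · rw [if_neg (by rintro ⟨-, hlt⟩; rw [hcnt s] at hlt; exact hx hlt)]
            simp [hs, hx]
    rw [h1, pvFoldB]
  rw [hsecond, pvItems_pvG, pvItems_pvG]

  -- both sides as a map over a filtered dedup of the group names
  rw [List.filter_map]
  have hfst : ((pvPairs locations).filter
        (fun p => decide (1 < ((((pvPairs locations).map Prod.fst).count p.1 : Int))))).map Prod.fst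
      = ((pvPairs locations).map Prod.fst).filter
          (fun k => decide (1 < ((((pvPairs locations).map Prod.fst).count k : Int)))) := by
    rw [List.filter_map]
    rfl
  rw [hfst, pvOfList_filter]
  -- align the two filter predicates on the dedup list
  have hpred : (PySem.Set.ofList ((pvPairs locations).map Prod.fst)).filter
        ((fun p => decide (1 < p.2.length)) ∘
          fun k => (k, ((pvPairs locations).filter (fun p => p.1 == k)).map (fun p => p.2)))
      = (PySem.Set.ofList ((pvPairs locations).map Prod.fst)).filter
          (fun k => decide (1 < ((((pvPairs locations).map Prod.fst).count k : Int)))) := by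
    apply List.filter_congr
    intro k _
    simp only [Function.comp, List.length_map]
    rw [pvCount_filter (pvPairs locations) k]
    simp only [decide_eq_decide]
    exact ⟨fun h => by exact_mod_cast h, fun h => by exact_mod_cast h⟩
  rw [hpred]
  -- align the mapped values on the filtered dedup list
  apply List.map_congr_left
  intro k hk
  have hqk : (1 : Int) < (((pvPairs locations).map Prod.fst).count k : Int) := by
    rcases List.mem_filter.mp hk with ⟨_, h2⟩
    exact of_decide_eq_true h2
  have hval : ((pvPairs locations).filter
        (fun p => decide (1 < ((((pvPairs locations).map Prod.fst).count p.1 : Int))))).filter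
          (fun p => p.1 == k)
      = (pvPairs locations).filter (fun p => p.1 == k) := by
    rw [List.filter_filter]
    apply List.filter_congr
    intro p _
    by_cases hpk : p.1 = k
    · simp [hpk, hqk]
    · simp [hpk]
  rw [hval]
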